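-- pv_equiv track=rewrite | github.com/abenison-crypto/maude-analyzer | scripts/fix_patient_treatments.py | parse_treatment_codes
-- ===== SOURCE A (Python) =====
-- def parse_treatment_codes(codes_str: str) -> dict:
--     """
--     Parse treatment codes string into boolean flags.
--
--     Args:
--         codes_str: Semicolon-separated treatment codes (e.g., "1;3;8").
--
--     Returns:
--         Dictionary mapping treatment field names to boolean values.
--     """
--     treatments = {
--         "treatment_drug": False,
--         "treatment_device": False,
--         "treatment_surgery": False,
--         "treatment_other": False,
--         "treatment_unknown": False,
--         "treatment_no_information": False,
--         "treatment_blood_products": False,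
--         "treatment_hospitalization": False,
--         "treatment_physical_therapy": False,
--     }
--
--     if not codes_str:
--         return treatments
--
--     # Map code to field name
--     code_to_field = {
--         "1": "treatment_drug",
--         "2": "treatment_device",
--         "3": "treatment_surgery",
--         "4": "treatment_other",
--         "5": "treatment_unknown",
--         "6": "treatment_no_information",
--         "7": "treatment_blood_products",
--         "8": "treatment_hospitalization",
--         "9": "treatment_physical_therapy",
--     }
--
--     codes = str(codes_str).split(";")
--     for code in codes:
--         code = code.strip()
--         if code in code_to_field:
--             treatments[code_to_field[code]] = True
--
--     return treatments
-- ===== SOURCE B (Python) =====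
-- def parse_treatment_codes(codes_str: str) -> dict:
--     """Parse treatment codes string into boolean flags."""
--     code_to_field = {
--         "1": "treatment_drug",
--         "2": "treatment_device",
--         "3": "treatment_surgery",
--         "4": "treatment_other",
--         "5": "treatment_unknown",
--         "6": "treatment_no_information",
--         "7": "treatment_blood_products",
--         "8": "treatment_hospitalization",
--         "9": "treatment_physical_therapy",
--     }
--     present = {c.strip() for c in str(codes_str).split(";")} if codes_str else set()
--     return {field: code in present for code, field in code_to_field.items()}
-- ===== Notes on version B (the rewrite author's own statement) =====
-- stated objective: idiomatic
-- what changed: B builds the set of present codes once and constructs the result by a comprehension over the fixed code-to-field mapping (iterating the output field space with membership tests), instead of initialising an all-False dict and mutating it while scanning the input codes.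
import Mathlib
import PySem

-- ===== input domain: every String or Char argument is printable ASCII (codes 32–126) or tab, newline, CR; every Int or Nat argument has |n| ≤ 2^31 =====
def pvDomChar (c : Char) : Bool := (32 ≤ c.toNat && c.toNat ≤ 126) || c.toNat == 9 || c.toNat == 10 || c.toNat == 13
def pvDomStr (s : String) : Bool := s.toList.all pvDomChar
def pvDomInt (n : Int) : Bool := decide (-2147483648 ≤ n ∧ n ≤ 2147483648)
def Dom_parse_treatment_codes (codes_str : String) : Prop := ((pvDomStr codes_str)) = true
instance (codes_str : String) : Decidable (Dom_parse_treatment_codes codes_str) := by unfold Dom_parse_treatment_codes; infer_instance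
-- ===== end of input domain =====

-- B iterates the fixed code→field mapping with membership tests in a pre-built set of
-- present codes, instead of A's mutate-an-all-False-dict scan of the input (idiomatic).

-- ===== PORT A =====
def pvCodeToField : PySem.Dict String String := PySem.Dict.ofList
  [("1", "treatment_drug"), ("2", "treatment_device"), ("3", "treatment_surgery"),
   ("4", "treatment_other"), ("5", "treatment_unknown"), ("6", "treatment_no_information"),
   ("7", "treatment_blood_products"), ("8", "treatment_hospitalization"),
   ("9", "treatment_physical_therapy")]

def parse_treatment_codes (codes_str : String) : List (String × Bool) :=
  let treatments : PySem.Dict String Bool := PySem.Dict.ofList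
    [("treatment_drug", false), ("treatment_device", false), ("treatment_surgery", false),
     ("treatment_other", false), ("treatment_unknown", false),
     ("treatment_no_information", false), ("treatment_blood_products", false),
     ("treatment_hospitalization", false), ("treatment_physical_therapy", false)]
  if codes_str = "" then treatments.items
  else
    let codes := (PySem.Str.split? codes_str ";").getD []
    (codes.foldl (fun d code =>
      let code := PySem.Str.strip code
      match pvCodeToField.get? code with
      | some f => d.insert f true
      | none => d) treatments).items

-- ===== PORT B =====
def pvCodeFieldPairs : List (String × String) :=
  [("1", "treatment_drug"), ("2", "treatment_device"), ("3", "treatment_surgery"),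
   ("4", "treatment_other"), ("5", "treatment_unknown"), ("6", "treatment_no_information"),
   ("7", "treatment_blood_products"), ("8", "treatment_hospitalization"),
   ("9", "treatment_physical_therapy")]

def parse_treatment_codes_alt (codes_str : String) : List (String × Bool) :=
  let present : PySem.Set String :=
    if codes_str = "" then PySem.Set.empty
    else PySem.Set.ofList (((PySem.Str.split? codes_str ";").getD []).map PySem.Str.strip)
  pvCodeFieldPairs.map (fun cf => (cf.2, decide (cf.1 ∈ present)))

-- ===== PRECONDITION & SPEC =====
def Spec_parse_treatment_codes (codes_str : String) (out : List (String × Bool)) : Prop := out = parse_treatment_codes_alt codes_str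
instance (codes_str : String) (out : List (String × Bool)) : Decidable (Spec_parse_treatment_codes codes_str out) := by unfold Spec_parse_treatment_codes; infer_instance

-- ===== CLAIM (what is proved, stated in full; the proofs are below) =====
def Claim_equal_parse_treatment_codes : Prop := ∀ (codes_str : String), Dom_parse_treatment_codes codes_str → Spec_parse_treatment_codes codes_str (parse_treatment_codes codes_str)

-- ===== LEMMAS AND PROOFS =====

-- the dictionary of the nine fields, with the flag of each field given by g on its code
def pvDictOf (g : String → Bool) : PySem.Dict String Bool :=
  PySem.Dict.mk (pvCodeFieldPairs.map (fun cf => (cf.2, g cf.1)))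

lemma pvCodeToField_mk : pvCodeToField = PySem.Dict.mk
    [("1", "treatment_drug"), ("2", "treatment_device"), ("3", "treatment_surgery"),
     ("4", "treatment_other"), ("5", "treatment_unknown"), ("6", "treatment_no_information"),
     ("7", "treatment_blood_products"), ("8", "treatment_hospitalization"),
     ("9", "treatment_physical_therapy")] := by decide

lemma pvStep (g : String → Bool) (s : String) :
    (match pvCodeToField.get? s with
      | some f => (pvDictOf g).insert f true
      | none => pvDictOf g) =
    pvDictOf (fun c => g c || (c == s)) := by
  rw [pvCodeToField_mk]
  simp only [PySem.Dict.get?_mk_cons]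
  split_ifs with h1 h2 h3 h4 h5 h6 h7 h8 h9 <;> simp only [beq_iff_eq] at * <;> subst_vars <;>
    apply PySem.Dict.ext <;>
    simp_all [pvDictOf, pvCodeFieldPairs, PySem.Dict.items_insert_of_contains,
      PySem.Dict.get?, beq_iff_eq]

lemma pvFold (codes : List String) (g : String → Bool) :
    codes.foldl (fun d code =>
      match pvCodeToField.get? (PySem.Str.strip code) with
      | some f => d.insert f true
      | none => d) (pvDictOf g) =
    pvDictOf (fun c => g c || decide (c ∈ codes.map PySem.Str.strip)) := by
  induction codes generalizing g with
  | nil => simp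
  | cons x xs ih =>
    simp only [List.foldl_cons, pvStep, ih, List.map_cons]
    congr 1
    funext c
    by_cases hc : c = PySem.Str.strip x
    · simp [hc]
    · have hb : (c == PySem.Str.strip x) = false := by
        simp [hc]
      simp [hb, hc]

lemma pvInit : PySem.Dict.ofList
    [("treatment_drug", false), ("treatment_device", false), ("treatment_surgery", false),
     ("treatment_other", false), ("treatment_unknown", false),
     ("treatment_no_information", false), ("treatment_blood_products", false),
     ("treatment_hospitalization", false), ("treatment_physical_therapy", false)]
    = pvDictOf (fun _ => false) := by decide

-- ===== VERDICT (by name: the statement is the Claim_ definition above) =====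
theorem parse_treatment_codes_spec : Claim_equal_parse_treatment_codes := by
  intro codes_str _
  unfold Spec_parse_treatment_codes parse_treatment_codes parse_treatment_codes_alt
  by_cases h : codes_str = ""
  · subst h; decide
  · simp only [h, if_false, pvInit, pvFold]
    simp [pvDictOf, PySem.Set.mem_ofList, pvCodeFieldPairs]
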